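-- pv_equiv track=rewrite | github.com/AndrewMonteith/DiagnosticDatasetScripts | timelines.py | generate_image_plot
-- ===== SOURCE A (Python) =====
-- SCALE_FACTOR = 1
--
-- def diag_lifetime(diag_and_lifetime):
--     (_, (enter, leave)) = diag_and_lifetime
--     return leave-enter
--
-- def scale(factor, d):
--     result = []
--     for i in d:
--         result.extend((i for _ in range(factor)))
--     return result
--
-- def gen_pixel_row(enter, leave, total):
--     def pixel(i):
--         if enter <= i <= leave:
--             return 0  # black for yes
--         else:
--             return 1  # white for no
--
--     return scale(SCALE_FACTOR, [pixel(i) for i in range(1, total+1)])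
--
-- def generate_image_plot(commit_and_diag_info):
--     result = []
--     for diag_and_lifetimes in commit_and_diag_info:
--         if len(diag_and_lifetimes) == 0:
--             continue
--
--         diag_and_lifetimes = sorted(diag_and_lifetimes,
--                                     reverse=True,
--                                     key=diag_lifetime)
--
--         for (_, (enter, leave)) in diag_and_lifetimes:
--             result.append(gen_pixel_row(
--                 enter+1, leave+1, len(commit_and_diag_info)-1))
--
--     return result
-- ===== SOURCE B (Python) =====
-- def gen_pixel_row(enter, leave, total):
--     total = max(0, total)
--     black = max(0, min(leave, total) - max(enter, 1) + 1)
--     before = max(0, min(enter - 1, total))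
--     after = total - before - black
--     return [1] * before + [0] * black + [1] * after
--
--
-- def generate_image_plot(commit_and_diag_info):
--     total = len(commit_and_diag_info) - 1
--     return [gen_pixel_row(enter + 1, leave + 1, total)
--             for group in commit_and_diag_info if group
--             for (_, (enter, leave)) in sorted(group, reverse=True,
--                                               key=lambda d: d[1][1] - d[1][0])]
-- ===== Notes on version B (the rewrite author's own statement) =====
-- stated objective: simpler
-- what changed: gen_pixel_row is rebuilt in closed form as three run-length segments ([1]*before + [0]*black + [1]*after) instead of a per-index pixel test over range(1,total+1), the no-op scale/SCALE_FACTOR machinery is dropped, and the outer accumulator loop becomes one flattening comprehension.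
import Mathlib
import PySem

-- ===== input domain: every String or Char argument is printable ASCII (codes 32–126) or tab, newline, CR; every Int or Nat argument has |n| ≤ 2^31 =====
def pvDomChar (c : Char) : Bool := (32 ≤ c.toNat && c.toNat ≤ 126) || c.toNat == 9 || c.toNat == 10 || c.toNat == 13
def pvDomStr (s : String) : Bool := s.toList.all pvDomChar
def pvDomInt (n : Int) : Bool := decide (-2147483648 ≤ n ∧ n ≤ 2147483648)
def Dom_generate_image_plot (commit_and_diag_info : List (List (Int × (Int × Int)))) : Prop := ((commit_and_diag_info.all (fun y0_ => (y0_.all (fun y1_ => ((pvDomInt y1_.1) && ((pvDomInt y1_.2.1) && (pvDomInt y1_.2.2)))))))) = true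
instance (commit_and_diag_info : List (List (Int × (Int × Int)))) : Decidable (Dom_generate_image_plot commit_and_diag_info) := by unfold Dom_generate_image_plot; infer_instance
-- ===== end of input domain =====

-- B builds each pixel row in closed form (three run-length segments) instead of testing every index,
-- drops the no-op scale/SCALE_FACTOR machinery, and flattens with one comprehension.  Objective: simpler.

-- ===== PORT A =====
def pyScale (factor : Int) (d : List Int) : List Int :=
  d.foldl (fun result i => result ++ (PySem.List.pyRange 0 factor 1).map (fun _ => i)) []

def genPixelRowA (enter leave total : Int) : List Int :=
  pyScale 1 ((PySem.List.pyRange 1 (total + 1) 1).map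
    (fun i => if enter ≤ i ∧ i ≤ leave then (0 : Int) else 1))

def generate_image_plot (commit_and_diag_info : List (List (Int × (Int × Int)))) : List (List Int) :=
  commit_and_diag_info.foldl
    (fun result g =>
      if (g.length : Int) == 0 then result
      else
        (PySem.List.sorted g (fun p => p.2.2 - p.2.1) true).foldl
          (fun r p => r ++ [genPixelRowA (p.2.1 + 1) (p.2.2 + 1) ((commit_and_diag_info.length : Int) - 1)]) result)
    []

-- ===== PORT B =====
def genPixelRowB (enter leave total : Int) : List Int :=
  let t := max 0 total
  let black := max 0 (min leave t - max enter 1 + 1)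
  let before := max 0 (min (enter - 1) t)
  let after := t - before - black
  List.replicate before.toNat 1 ++ List.replicate black.toNat 0 ++ List.replicate after.toNat 1

def generate_image_plot_alt (commit_and_diag_info : List (List (Int × (Int × Int)))) : List (List Int) :=
  commit_and_diag_info.flatMap (fun g =>
    if g.isEmpty then []
    else
      (PySem.List.sorted g (fun p => p.2.2 - p.2.1) true).map
        (fun p => genPixelRowB (p.2.1 + 1) (p.2.2 + 1) ((commit_and_diag_info.length : Int) - 1)))

-- ===== PRECONDITION & SPEC =====
def Spec_generate_image_plot (commit_and_diag_info : List (List (Int × (Int × Int)))) (out : List (List Int)) : Prop := out = generate_image_plot_alt commit_and_diag_info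
instance (commit_and_diag_info : List (List (Int × (Int × Int)))) (out : List (List Int)) : Decidable (Spec_generate_image_plot commit_and_diag_info out) := by unfold Spec_generate_image_plot; infer_instance

-- ===== CLAIM (what is proved, stated in full; the proofs are below) =====
def Claim_equal_generate_image_plot : Prop := ∀ (commit_and_diag_info : List (List (Int × (Int × Int)))), Dom_generate_image_plot commit_and_diag_info → Spec_generate_image_plot commit_and_diag_info (generate_image_plot commit_and_diag_info)

-- ===== LEMMAS AND PROOFS =====

theorem pyScale_one (d : List Int) : pyScale 1 d = d := by
  unfold pyScale
  have h : (PySem.List.pyRange 0 1 1) = [0] := by decide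
  simp only [h, List.map_cons, List.map_nil]
  rw [PySem.List.foldl_append_singleton_eq_map]
  simp

theorem map_pyRange_const (a b : Int) (f : Int → Int) (c : Int)
    (h : ∀ i, a ≤ i → i < b → f i = c) :
    (PySem.List.pyRange a b 1).map f = List.replicate (b - a).toNat c := by
  apply List.eq_replicate_iff.mpr
  constructor
  · simp [PySem.List.length_pyRange_one]
  · intro x hx
    obtain ⟨i, hi, rfl⟩ := List.mem_map.mp hx
    obtain ⟨h1, h2⟩ := PySem.List.mem_pyRange_one.mp hi
    exact h i h1 h2

theorem row_eq (enter leave total : Int) :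
    genPixelRowA enter leave total = genPixelRowB enter leave total := by
  unfold genPixelRowA genPixelRowB
  rw [pyScale_one]
  dsimp only
  set t := max 0 total with ht
  have hR : PySem.List.pyRange 1 (total + 1) 1 = PySem.List.pyRange 1 (t + 1) 1 := by
    rcases (by omega : total + 1 = t + 1 ∨ t = 0 ∧ total + 1 ≤ 1) with h | ⟨h1, h2⟩
    · rw [h]
    · rw [PySem.List.pyRange_one_eq_nil h2, PySem.List.pyRange_one_eq_nil (by omega)]
  rw [hR]
  by_cases hbl : max enter 1 ≤ min leave t
  · -- some black pixels: split the range at max enter 1 and min leave t + 1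
    rw [PySem.List.pyRange_one_append 1 (max enter 1) (t + 1) (by omega) (by omega),
        PySem.List.pyRange_one_append (max enter 1) (min leave t + 1) (t + 1) (by omega) (by omega),
        List.map_append, List.map_append,
        map_pyRange_const 1 (max enter 1) _ 1 (by intro i hi1 hi2; simp only [ite_eq_right_iff]; omega),
        map_pyRange_const (max enter 1) (min leave t + 1) _ 0 (by intro i hi1 hi2; simp only [ite_eq_left_iff]; omega),
        map_pyRange_const (min leave t + 1) (t + 1) _ 1 (by intro i hi1 hi2; simp only [ite_eq_right_iff]; omega)]
    have e1 : (max enter 1 - 1).toNat = (max 0 (min (enter - 1) t)).toNat := by omega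
    have e2 : (min leave t + 1 - max enter 1).toNat
        = (max 0 (min leave t - max enter 1 + 1)).toNat := by omega
    have e3 : (t + 1 - (min leave t + 1)).toNat
        = (t - max 0 (min (enter - 1) t) - max 0 (min leave t - max enter 1 + 1)).toNat := by omega
    rw [e1, e2, e3, List.append_assoc]
  · -- no black pixels: every pixel is white
    rw [map_pyRange_const 1 (t + 1) _ 1 (by intro i hi1 hi2; simp only [ite_eq_right_iff]; omega)]
    have hb0 : (max 0 (min leave t - max enter 1 + 1)).toNat = 0 := by omega
    have e : (t + 1 - 1).toNat = (max 0 (min (enter - 1) t)).toNat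
        + (t - max 0 (min (enter - 1) t) - max 0 (min leave t - max enter 1 + 1)).toNat := by omega
    rw [e, hb0, List.replicate_add]
    simp

theorem inner_foldl (xs : List (Int × (Int × Int))) (init : List (List Int)) (n : Int) :
    xs.foldl (fun r p => r ++ [genPixelRowA (p.2.1 + 1) (p.2.2 + 1) n]) init
      = init ++ xs.map (fun p => genPixelRowB (p.2.1 + 1) (p.2.2 + 1) n) := by
  rw [PySem.List.foldl_append_singleton_eq_map]
  congr 1
  exact List.map_congr_left (fun p _ => row_eq _ _ _)

theorem outer_eq (cdi : List (List (Int × (Int × Int)))) (n : Int) (init : List (List Int)) :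
    cdi.foldl
      (fun result g =>
        if (g.length : Int) == 0 then result
        else
          (PySem.List.sorted g (fun p => p.2.2 - p.2.1) true).foldl
            (fun r p => r ++ [genPixelRowA (p.2.1 + 1) (p.2.2 + 1) n]) result)
      init
    = init ++ cdi.flatMap (fun g =>
        if g.isEmpty then []
        else
          (PySem.List.sorted g (fun p => p.2.2 - p.2.1) true).map
            (fun p => genPixelRowB (p.2.1 + 1) (p.2.2 + 1) n)) := by
  induction cdi generalizing init with
  | nil => simp
  | cons g gs ih =>
    rw [List.foldl_cons, List.flatMap_cons]
    by_cases hg : g = []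
    · subst hg
      rw [if_pos (by decide), ih]
      simp
    · have h1 : (((g.length : Int)) == 0) = false := by
        simp [List.length_eq_zero_iff, hg]
      have h2 : g.isEmpty = false := by simp [hg]
      rw [h1]
      rw [if_neg (by simp), inner_foldl, ih, h2]
      simp [List.append_assoc]

-- ===== VERDICT (by name: the statement is the Claim_ definition above) =====
theorem generate_image_plot_spec : Claim_equal_generate_image_plot := by
  intro cdi _
  show generate_image_plot cdi = generate_image_plot_alt cdi
  unfold generate_image_plot generate_image_plot_alt
  simpa using outer_eq cdi ((cdi.length : Int) - 1) []
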